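-- pv_equiv track=rewrite | github.com/darraghmahns/doc-intel-backend | nodes/mapper.py | validate_participants
-- ===== SOURCE A (Python) =====
-- from typing import List, Dict, Optional, Any, Sequence, Union, Set, cast
-- from enum import Enum
--
-- class DotloopParticipantRole(str, Enum):
--     """Valid Dotloop participant roles per API."""
--     # Primary parties
--     BUYER = "BUYER"
--     SELLER = "SELLER"
--     LANDLORD = "LANDLORD"
--     TENANT = "TENANT"
--     # Agents
--     LISTING_AGENT = "LISTING_AGENT"
--     BUYING_AGENT = "BUYING_AGENT"
--     # Brokers
--     LISTING_BROKER = "LISTING_BROKER"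
--     BUYING_BROKER = "BUYING_BROKER"
--     LISTING_TC = "LISTING_TC"
--     BUYING_TC = "BUYING_TC"
--     # Service providers
--     ESCROW_TITLE_REP = "ESCROW_TITLE_REP"
--     LOAN_OFFICER = "LOAN_OFFICER"
--     APPRAISER = "APPRAISER"
--     HOME_INSPECTOR = "HOME_INSPECTOR"
--     ATTORNEY = "ATTORNEY"
--     REFERRAL_AGENT = "REFERRAL_AGENT"
--     # Other
--     OTHER = "OTHER"
--
-- def get_valid_participant_roles() -> Set[str]:
--     """Return set of all valid Dotloop participant roles."""
--     return {role.value for role in DotloopParticipantRole}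
--
-- def validate_participant_role(role: str) -> bool:
--     """Check if a role is valid for Dotloop API."""
--     return role in get_valid_participant_roles()
--
-- def validate_participants(participants: List[Dict[str, Any]]) -> List[str]:
--     """
--     Validate participant data and return list of issues.
--     """
--     issues = []
--
--     # Check for required roles
--     roles = {p.get("role") for p in participants}
--
--     if "BUYER" not in roles and "TENANT" not in roles:
--         issues.append("Missing buyer/tenant information")
--     if "SELLER" not in roles and "LANDLORD" not in roles:
--         issues.append("Missing seller/landlord information")
--
--     # Validate each participant
--     for i, p in enumerate(participants):
--         role = p.get("role", "")
--         name = p.get("full_name", "")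
--
--         if not name:
--             issues.append(f"Participant #{i+1} with role {role} missing name")
--
--         # Validate role
--         if role and not validate_participant_role(role):
--             issues.append(f"Invalid role '{role}' for {name or f'participant #{i+1}'}")
--
--     return issues
-- ===== SOURCE B (Python) =====
-- _VALID_ROLES = frozenset({
--     "BUYER", "SELLER", "LANDLORD", "TENANT",
--     "LISTING_AGENT", "BUYING_AGENT",
--     "LISTING_BROKER", "BUYING_BROKER", "LISTING_TC", "BUYING_TC",
--     "ESCROW_TITLE_REP", "LOAN_OFFICER", "APPRAISER", "HOME_INSPECTOR",
--     "ATTORNEY", "REFERRAL_AGENT",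
--     "OTHER",
-- })
--
-- _HEADERS = (
--     (("BUYER", "TENANT"), "Missing buyer/tenant information"),
--     (("SELLER", "LANDLORD"), "Missing seller/landlord information"),
-- )
--
-- def _per_participant(i, rest):
--     """Recursively build the per-participant issues back-to-front (prepends)."""
--     if not rest:
--         return []
--     p = rest[0]
--     role = p.get("role", "")
--     name = p.get("full_name", "")
--     out = _per_participant(i + 1, rest[1:])
--     if role and role not in _VALID_ROLES:
--         out = [f"Invalid role '{role}' for {name or f'participant #{i+1}'}"] + out
--     if not name:
--         out = [f"Participant #{i+1} with role {role} missing name"] + out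
--     return out
--
-- def validate_participants(participants):
--     headers = [msg for names, msg in _HEADERS
--                if not any(p.get("role") in names for p in participants)]
--     return headers + _per_participant(0, participants)
-- ===== Notes on version B (the rewrite author's own statement) =====
-- stated objective: alternative
-- what changed: Replaced A's roles-set construction plus an imperative appending loop by a table-driven comprehension over the two header rules (using any()) and a recursive helper that builds the per-participant issues back-to-front by prepending.
import Mathlib
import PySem

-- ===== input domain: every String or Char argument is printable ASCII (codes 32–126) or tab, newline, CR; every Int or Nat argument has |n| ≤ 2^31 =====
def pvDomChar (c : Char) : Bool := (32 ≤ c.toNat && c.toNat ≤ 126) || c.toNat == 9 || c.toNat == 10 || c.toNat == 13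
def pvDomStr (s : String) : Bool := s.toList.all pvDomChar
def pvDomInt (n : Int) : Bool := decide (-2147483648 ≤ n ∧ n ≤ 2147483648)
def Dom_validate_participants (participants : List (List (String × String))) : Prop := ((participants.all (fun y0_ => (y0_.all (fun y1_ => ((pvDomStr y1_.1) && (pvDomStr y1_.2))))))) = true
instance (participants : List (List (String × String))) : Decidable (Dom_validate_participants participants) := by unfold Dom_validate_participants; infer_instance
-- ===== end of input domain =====

-- B replaces A's roles-set pass + imperative appending loop by a table-driven comprehension
-- over the two header rules and a recursive helper building per-participant issues
-- back-to-front; objective: alternative decomposition, same cost.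

-- Both Pythons contain the same literal f-strings; shared formatting helpers for both ports.
def pvMsgMissingName (i : Int) (role : String) : String :=
  String.ofList ("Participant #".toList ++ PySem.Int.toChars (i + 1) ++ " with role ".toList
    ++ role.toList ++ " missing name".toList)

def pvMsgInvalidRole (role name : String) (i : Int) : String :=
  String.ofList ("Invalid role '".toList ++ role.toList ++ "' for ".toList
    ++ (if name = "" then "participant #".toList ++ PySem.Int.toChars (i + 1) else name.toList))

-- ===== PORT A =====
-- the values of DotloopParticipantRole, in declaration order
def pvRoleEnumValues : List String :=
  ["BUYER", "SELLER", "LANDLORD", "TENANT", "LISTING_AGENT", "BUYING_AGENT",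
   "LISTING_BROKER", "BUYING_BROKER", "LISTING_TC", "BUYING_TC",
   "ESCROW_TITLE_REP", "LOAN_OFFICER", "APPRAISER", "HOME_INSPECTOR",
   "ATTORNEY", "REFERRAL_AGENT", "OTHER"]

def get_valid_participant_roles : PySem.Set String := PySem.Set.ofList pvRoleEnumValues

def validate_participant_role (role : String) : Bool :=
  PySem.Set.contains get_valid_participant_roles role

def validate_participants (participants : List (List (String × String))) : List String :=
  let issues : List String := []
  let roles : PySem.Set (Option String) :=
    PySem.Set.ofList (participants.map (fun p => (PySem.Dict.mk p).get? "role"))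
  let issues := if some "BUYER" ∉ roles ∧ some "TENANT" ∉ roles
    then issues ++ ["Missing buyer/tenant information"] else issues
  let issues := if some "SELLER" ∉ roles ∧ some "LANDLORD" ∉ roles
    then issues ++ ["Missing seller/landlord information"] else issues
  (PySem.List.enumerate participants).foldl (fun issues ip =>
    let role := (PySem.Dict.mk ip.2).getD "role" ""
    let name := (PySem.Dict.mk ip.2).getD "full_name" ""
    let issues := if name = "" then issues ++ [pvMsgMissingName ip.1 role] else issues
    if role ≠ "" ∧ ¬ (validate_participant_role role = true)
      then issues ++ [pvMsgInvalidRole role name ip.1] else issues) issues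

-- ===== PORT B =====
-- B's frozenset literal of valid roles (same strings)
def pvValidRolesB : List String :=
  ["BUYER", "SELLER", "LANDLORD", "TENANT", "LISTING_AGENT", "BUYING_AGENT",
   "LISTING_BROKER", "BUYING_BROKER", "LISTING_TC", "BUYING_TC",
   "ESCROW_TITLE_REP", "LOAN_OFFICER", "APPRAISER", "HOME_INSPECTOR",
   "ATTORNEY", "REFERRAL_AGENT", "OTHER"]

-- B's _HEADERS table: (role names that satisfy the rule, message if none present)
def pvHeaders : List (List String × String) :=
  [(["BUYER", "TENANT"], "Missing buyer/tenant information"),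
   (["SELLER", "LANDLORD"], "Missing seller/landlord information")]

-- B's _per_participant: recursion on the list, issues built back-to-front by prepending
def pvPerParticipant (i : Int) (rest : List (List (String × String))) : List String :=
  match rest with
  | [] => []
  | p :: t =>
    let role := (PySem.Dict.mk p).getD "role" ""
    let name := (PySem.Dict.mk p).getD "full_name" ""
    let out := pvPerParticipant (i + 1) t
    let out := if role ≠ "" ∧ role ∉ pvValidRolesB
      then [pvMsgInvalidRole role name i] ++ out else out
    if name = "" then [pvMsgMissingName i role] ++ out else out

def validate_participants_alt (participants : List (List (String × String))) : List String :=
  let headers := (pvHeaders.filter (fun nm =>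
    ! participants.any (fun p => nm.1.any (fun r => (PySem.Dict.mk p).get? "role" == some r)))).map (·.2)
  headers ++ pvPerParticipant 0 participants

-- ===== PRECONDITION & SPEC =====
def Spec_validate_participants (participants : List (List (String × String))) (out : List String) : Prop := out = validate_participants_alt participants
instance (participants : List (List (String × String))) (out : List String) : Decidable (Spec_validate_participants participants out) := by unfold Spec_validate_participants; infer_instance

-- ===== CLAIM (what is proved, stated in full; the proofs are below) =====
def Claim_equal_validate_participants : Prop := ∀ (participants : List (List (String × String))), Dom_validate_participants participants → Spec_validate_participants participants (validate_participants participants)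

-- ===== LEMMAS AND PROOFS =====

-- per-participant messages produced by index i and participant p (common shape of both loops)
def pvMsgs (i : Int) (p : List (String × String)) : List String :=
  let role := (PySem.Dict.mk p).getD "role" ""
  let name := (PySem.Dict.mk p).getD "full_name" ""
  (if name = "" then [pvMsgMissingName i role] else []) ++
  (if role ≠ "" ∧ role ∉ pvRoleEnumValues then [pvMsgInvalidRole role name i] else [])

lemma pv_foldA (l : List (List (String × String))) :
    ∀ (s : Int) (acc : List String),
    (PySem.List.enumerate l s).foldl (fun issues ip =>
      let role := (PySem.Dict.mk ip.2).getD "role" ""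
      let name := (PySem.Dict.mk ip.2).getD "full_name" ""
      let issues := if name = "" then issues ++ [pvMsgMissingName ip.1 role] else issues
      if role ≠ "" ∧ ¬ (validate_participant_role role = true)
        then issues ++ [pvMsgInvalidRole role name ip.1] else issues) acc
    = acc ++ (PySem.List.enumerate l s).flatMap (fun ip => pvMsgs ip.1 ip.2) := by
  induction l with
  | nil => intro s acc; simp [PySem.List.enumerate_nil]
  | cons p t ih =>
    intro s acc
    rw [PySem.List.enumerate_cons]
    simp only [List.foldl_cons, List.flatMap_cons]
    rw [ih]
    have hrole : validate_participant_role ((PySem.Dict.mk p).getD "role" "") = true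
        ↔ (PySem.Dict.mk p).getD "role" "" ∈ pvRoleEnumValues := by
      rw [validate_participant_role, get_valid_participant_roles, PySem.Set.contains_iff,
        PySem.Set.mem_ofList]
    simp only [pvMsgs]
    split_ifs with h1 h2 h2 <;> simp_all

-- B's recursion produces exactly the concatenation of the per-participant messages
lemma pv_perB (l : List (List (String × String))) :
    ∀ (s : Int),
    pvPerParticipant s l = (PySem.List.enumerate l s).flatMap (fun ip => pvMsgs ip.1 ip.2) := by
  induction l with
  | nil => intro s; simp [pvPerParticipant, PySem.List.enumerate_nil]
  | cons p t ih =>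
    intro s
    rw [PySem.List.enumerate_cons]
    simp only [List.flatMap_cons, pvPerParticipant, pvMsgs]
    rw [ih]
    have hroles : pvValidRolesB = pvRoleEnumValues := rfl
    simp only [hroles]
    split_ifs <;> simp [pvMsgs]

-- A's set-membership header condition ↔ B's any() header condition, for each rule
lemma pv_headerBT (l : List (List (String × String))) :
    (some "BUYER" ∉ PySem.Set.ofList (l.map (fun p => (PySem.Dict.mk p).get? "role")) ∧
     some "TENANT" ∉ PySem.Set.ofList (l.map (fun p => (PySem.Dict.mk p).get? "role")))
    ↔ (l.any (fun p => (["BUYER", "TENANT"] : List String).any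
        (fun r => (PySem.Dict.mk p).get? "role" == some r))) = false := by
  simp only [PySem.Set.mem_ofList, List.mem_map, List.any_eq_false, List.any_cons, List.any_nil,
    Bool.or_false, not_exists]
  aesop

lemma pv_headerSL (l : List (List (String × String))) :
    (some "SELLER" ∉ PySem.Set.ofList (l.map (fun p => (PySem.Dict.mk p).get? "role")) ∧
     some "LANDLORD" ∉ PySem.Set.ofList (l.map (fun p => (PySem.Dict.mk p).get? "role")))
    ↔ (l.any (fun p => (["SELLER", "LANDLORD"] : List String).any
        (fun r => (PySem.Dict.mk p).get? "role" == some r))) = false := by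
  simp only [PySem.Set.mem_ofList, List.mem_map, List.any_eq_false, List.any_cons, List.any_nil,
    Bool.or_false, not_exists]
  aesop

-- ===== VERDICT (by name: the statement is the Claim_ definition above) =====
theorem validate_participants_spec : Claim_equal_validate_participants := by
  intro l _
  show validate_participants l = validate_participants_alt l
  simp only [validate_participants, validate_participants_alt]
  rw [pv_foldA, pv_perB]
  simp only [pv_headerBT, pv_headerSL]
  cases hBT : l.any (fun p => (["BUYER", "TENANT"] : List String).any
      (fun r => (PySem.Dict.mk p).get? "role" == some r)) <;>
  cases hSL : l.any (fun p => (["SELLER", "LANDLORD"] : List String).any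
      (fun r => (PySem.Dict.mk p).get? "role" == some r)) <;>
    simp only [pvHeaders, List.filter_cons, List.filter_nil, hBT, hSL, Bool.not_false,
      Bool.not_true, if_true, List.map_cons, List.map_nil] <;> simp
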